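-- pv_equiv track=rewrite | github.com/pmvrak/sample-ai-powered-sdlc-patterns-with-aws | design-and-architecture/design-solutionarchitecture-mcp/mcp-server/drawing_module.py | group_components_intelligently
-- ===== SOURCE A (Python) =====
-- def group_components_intelligently(components):
--     """Group components by AWS service category for better diagram organization"""
--     groups = {
--         "Frontend": ["Route53", "CloudFront", "ALB", "NLB", "ELB", "ApplicationLoadBalancer", "NetworkLoadBalancer"],
--         "Compute": ["EC2", "ECS", "Lambda", "Fargate", "Batch", "LambdaFunction"],
--         "Data": ["RDS", "DynamoDB", "ElastiCache", "S3", "Redshift", "Aurora", "DocumentDB"],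
--         "Integration": ["SQS", "SNS", "API Gateway", "EventBridge", "StepFunctions", "MQ"],
--         "Security": ["WAF", "Cognito", "IAM", "KMS", "SecretsManager", "Shield"],
--         "Monitoring": ["CloudWatch", "CloudTrail", "X-Ray", "Config"],
--         "Network": ["VPC", "Subnet", "NATGateway", "InternetGateway", "DirectConnect"]
--     }
--
--     organized = {}
--     ungrouped = []
--
--     for component in components:
--         grouped = False
--         for group, services in groups.items():
--             if component in services:
--                 if group not in organized:
--                     organized[group] = []
--                 organized[group].append(component)
--                 grouped = True
--                 break
--         if not grouped:
--             ungrouped.append(component)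
--
--     # Add ungrouped components to a general category
--     if ungrouped:
--         organized["Other"] = ungrouped
--
--     return organized
-- ===== SOURCE B (Python) =====
-- def group_components_intelligently(components):
--     """Group components by AWS service category for better diagram organization"""
--     groups = {
--         "Frontend": ["Route53", "CloudFront", "ALB", "NLB", "ELB", "ApplicationLoadBalancer", "NetworkLoadBalancer"],
--         "Compute": ["EC2", "ECS", "Lambda", "Fargate", "Batch", "LambdaFunction"],
--         "Data": ["RDS", "DynamoDB", "ElastiCache", "S3", "Redshift", "Aurora", "DocumentDB"],
--         "Integration": ["SQS", "SNS", "API Gateway", "EventBridge", "StepFunctions", "MQ"],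
--         "Security": ["WAF", "Cognito", "IAM", "KMS", "SecretsManager", "Shield"],
--         "Monitoring": ["CloudWatch", "CloudTrail", "X-Ray", "Config"],
--         "Network": ["VPC", "Subnet", "NATGateway", "InternetGateway", "DirectConnect"]
--     }
--     # reverse index built once: service name -> category
--     category_of = {service: group for group, services in groups.items() for service in services}
--
--     organized = {}
--     other = []
--     for component in components:
--         category = category_of.get(component)
--         if category is None:
--             other.append(component)
--         else:
--             organized.setdefault(category, []).append(component)
--
--     if other:
--         organized["Other"] = other
--     return organized
-- ===== Notes on version B (the rewrite author's own statement) =====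
-- stated objective: faster
-- what changed: Replaces the per-component nested scan over all category service lists (with break) by a reverse index service->category built once, then a single O(1)-average dict lookup per component in one pass.
import Mathlib
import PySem

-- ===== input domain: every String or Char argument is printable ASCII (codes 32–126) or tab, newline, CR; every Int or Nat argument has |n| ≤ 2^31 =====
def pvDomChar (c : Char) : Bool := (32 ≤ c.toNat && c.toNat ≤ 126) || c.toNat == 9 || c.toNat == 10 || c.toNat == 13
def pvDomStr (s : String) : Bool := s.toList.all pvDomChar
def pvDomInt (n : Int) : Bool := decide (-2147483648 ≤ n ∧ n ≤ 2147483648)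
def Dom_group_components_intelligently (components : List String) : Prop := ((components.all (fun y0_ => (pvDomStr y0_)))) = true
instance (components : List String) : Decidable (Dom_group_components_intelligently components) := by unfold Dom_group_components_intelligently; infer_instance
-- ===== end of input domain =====

-- B replaces A's per-component scan over all category lists (with break) by a reverse
-- index service→category built once, then one dict lookup per component (measured faster).

-- ===== PORT A =====
def pvGroupsA : List (String × List String) :=
  [("Frontend", ["Route53", "CloudFront", "ALB", "NLB", "ELB", "ApplicationLoadBalancer", "NetworkLoadBalancer"]),
   ("Compute", ["EC2", "ECS", "Lambda", "Fargate", "Batch", "LambdaFunction"]),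
   ("Data", ["RDS", "DynamoDB", "ElastiCache", "S3", "Redshift", "Aurora", "DocumentDB"]),
   ("Integration", ["SQS", "SNS", "API Gateway", "EventBridge", "StepFunctions", "MQ"]),
   ("Security", ["WAF", "Cognito", "IAM", "KMS", "SecretsManager", "Shield"]),
   ("Monitoring", ["CloudWatch", "CloudTrail", "X-Ray", "Config"]),
   ("Network", ["VPC", "Subnet", "NATGateway", "InternetGateway", "DirectConnect"])]

-- A's inner 'for group, services in groups.items(): … break' loop: first group whose
-- service list contains the component updates organized and sets grouped = True.
def pvInnerA (c : String) (org : PySem.Dict String (List String)) :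
    List (String × List String) → (PySem.Dict String (List String)) × Bool
  | [] => (org, false)
  | (g, services) :: rest =>
    if services.contains c then
      ((if org.contains g then org else org.insert g []).modify g [] (fun l => l ++ [c]), true)
    else pvInnerA c org rest

def group_components_intelligently (components : List String) : List (String × List String) :=
  let st := components.foldl
    (fun (st : PySem.Dict String (List String) × List String) comp =>
      let r := pvInnerA comp st.1 pvGroupsA
      if r.2 then (r.1, st.2) else (r.1, st.2 ++ [comp]))
    (PySem.Dict.empty, [])
  let organized := if st.2.isEmpty then st.1 else st.1.insert "Other" st.2
  organized.items

-- ===== PORT B =====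
-- Source B defines the same `groups` table literal; the constant pvGroupsA above is that table.
-- the dict comprehension {service: group for group, services in groups.items() for service in services}
def pvCatOf : PySem.Dict String String :=
  pvGroupsA.foldl (fun d gp => gp.2.foldl (fun d s => d.insert s gp.1) d) PySem.Dict.empty

def group_components_intelligently_alt (components : List String) : List (String × List String) :=
  let st := components.foldl
    (fun (st : PySem.Dict String (List String) × List String) comp =>
      match pvCatOf.get? comp with
      | none => (st.1, st.2 ++ [comp])
      | some cat => (st.1.modify cat [] (fun l => l ++ [comp]), st.2))
    (PySem.Dict.empty, [])
  let organized := if st.2.isEmpty then st.1 else st.1.insert "Other" st.2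
  organized.items

-- ===== PRECONDITION & SPEC =====
def Spec_group_components_intelligently (components : List String) (out : List (String × List String)) : Prop := out = group_components_intelligently_alt components
instance (components : List String) (out : List (String × List String)) : Decidable (Spec_group_components_intelligently components out) := by unfold Spec_group_components_intelligently; infer_instance

-- ===== CLAIM (what is proved, stated in full; the proofs are below) =====
def Claim_equal_group_components_intelligently : Prop := ∀ (components : List String), Dom_group_components_intelligently components → Spec_group_components_intelligently components (group_components_intelligently components)

-- ===== LEMMAS AND PROOFS =====

-- pre-creating an empty list then appending equals modify-with-default
lemma pv_setdefault_append (d : PySem.Dict String (List String)) (g c : String) :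
    (if d.contains g then d else d.insert g []).modify g [] (fun l => l ++ [c])
      = d.modify g [] (fun l => l ++ [c]) := by
  by_cases h : d.contains g
  · simp [h]
  · have h' : d.contains g = false := by simpa using h
    simp [PySem.Dict.modify, h', PySem.Dict.getD_insert_self, PySem.Dict.insert_insert_self,
      PySem.Dict.getD_of_not_contains _ _ h']

-- flatten a group list into (service, group) pairs
def pvFlat (gs : List (String × List String)) : List (String × String) :=
  gs.flatMap (fun gp => gp.2.map (fun s => (s, gp.1)))

lemma pv_lookup_block (c g : String) (ss : List String) (L : List (String × String)) :
    (ss.map (fun s => (s, g)) ++ L).lookup c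
      = if ss.contains c then some g else L.lookup c := by
  induction ss with
  | nil => simp
  | cons s t ih =>
    by_cases h : c = s
    · simp [h]
    · have hb : (c == s) = false := beq_eq_false_iff_ne.mpr h
      simp [List.lookup, hb, ih, h]

lemma pv_innerA_eq_lookup (c : String) (org : PySem.Dict String (List String)) :
    ∀ gs : List (String × List String),
      pvInnerA c org gs =
        match (pvFlat gs).lookup c with
        | some g => ((if org.contains g then org else org.insert g []).modify g [] (fun l => l ++ [c]), true)
        | none => (org, false) := by
  intro gs
  induction gs with
  | nil => simp [pvInnerA, pvFlat]
  | cons gp rest ih =>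
    obtain ⟨g, services⟩ := gp
    simp only [pvInnerA, pvFlat, List.flatMap_cons, pv_lookup_block]
    by_cases h : c ∈ services
    · simp [h]
    · simp [h, List.contains_eq_mem]
      simpa [pvFlat] using ih

lemma pv_get?_mk_eq_lookup (c : String) :
    ∀ l : List (String × String), (PySem.Dict.mk l).get? c = l.lookup c := by
  intro l
  induction l with
  | nil => rfl
  | cons p t ih =>
    obtain ⟨k, v⟩ := p
    rw [PySem.Dict.get?_mk_cons]
    by_cases h : c = k
    · simp [List.lookup, h]
    · have hb : (c == k) = false := beq_eq_false_iff_ne.mpr h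
      simp [List.lookup, hb, Ne.symm h, ih]

set_option maxRecDepth 8192 in
lemma pv_catOf_get? (c : String) : pvCatOf.get? c = (pvFlat pvGroupsA).lookup c := by
  have h1 : pvCatOf = PySem.Dict.mk (pvFlat pvGroupsA) := by decide
  rw [h1, pv_get?_mk_eq_lookup]

lemma pv_step_eq :
    (fun (st : PySem.Dict String (List String) × List String) comp =>
      let r := pvInnerA comp st.1 pvGroupsA
      if r.2 then (r.1, st.2) else (r.1, st.2 ++ [comp]))
    = (fun (st : PySem.Dict String (List String) × List String) comp =>
      match pvCatOf.get? comp with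
      | none => (st.1, st.2 ++ [comp])
      | some cat => (st.1.modify cat [] (fun l => l ++ [comp]), st.2)) := by
  funext st comp
  rw [pv_catOf_get?]
  rcases h : (pvFlat pvGroupsA).lookup comp with _ | g <;>
    simp [pv_innerA_eq_lookup, h, pv_setdefault_append]

-- ===== VERDICT (by name: the statement is the Claim_ definition above) =====
theorem group_components_intelligently_spec : Claim_equal_group_components_intelligently := by
  intro components _
  unfold Spec_group_components_intelligently group_components_intelligently group_components_intelligently_alt
  rw [pv_step_eq]
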